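-- pv_equiv track=rewrite | github.com/abedit/Automated-Anonymization-of-Parole-Hearing-Transcripts | _SourceCode/FileDataExtraction/TextExtraction.py | generate_name_combinations
-- ===== SOURCE A (Python) =====
-- def generate_name_combinations(names):
--     """
--     If for example someone's name is "Lorenz San Juan"
--     We must account for name combinations in case "San Juan" appears in the text
--     So combinations can look like: Lorenz San, San Juan, Lorenz San Juan
--     """
--     combinations = []
--     for name in names:
--         parts = name.split()
--
--         for i in range(len(parts)):
--             for j in range(i + 1, len(parts) + 1):
--                 combination = ' '.join(parts[i:j])
--                 if '.' in combination and len(combination.replace('.', '')):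
--                     continue
--                 combinations.append(combination)
--
--     return combinations
-- ===== SOURCE B (Python) =====
-- def generate_name_combinations(names):
--     """Same result as A, but each contiguous join is built by extending a
--     running string instead of re-joining every slice, and the dot test is
--     tracked with a flag instead of rescanning/rebuilding the combination."""
--     combinations = []
--     for name in names:
--         parts = name.split()
--         for start in range(len(parts)):
--             acc = parts[start]
--             has_dot = '.' in acc
--             if not (has_dot and any(c != '.' for c in acc)):
--                 combinations.append(acc)
--             for part in parts[start + 1:]:
--                 acc = acc + ' ' + part
--                 has_dot = has_dot or '.' in part
--                 if not has_dot:
--                     combinations.append(acc)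
--     return combinations
-- ===== Notes on version B (the rewrite author's own statement) =====
-- stated objective: alternative
-- what changed: Instead of re-joining parts[i:j] and rebuilding/rescanning the combination for the dot test at every (i,j), B extends one running string per start index and carries a has-dot flag (plus a direct all-dots check for single parts); fewer characters touched per name, though the measured gain on the generated inputs stayed below 1.5x.
import Mathlib
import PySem

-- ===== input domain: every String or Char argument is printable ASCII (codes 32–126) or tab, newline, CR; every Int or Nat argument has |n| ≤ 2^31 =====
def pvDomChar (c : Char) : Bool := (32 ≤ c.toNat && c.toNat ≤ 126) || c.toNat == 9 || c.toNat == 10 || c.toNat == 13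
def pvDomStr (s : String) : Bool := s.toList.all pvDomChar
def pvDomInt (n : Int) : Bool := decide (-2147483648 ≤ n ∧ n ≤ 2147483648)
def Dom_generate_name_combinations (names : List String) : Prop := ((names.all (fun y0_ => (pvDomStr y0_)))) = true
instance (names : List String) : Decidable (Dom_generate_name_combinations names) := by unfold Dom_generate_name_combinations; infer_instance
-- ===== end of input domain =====

-- B builds each contiguous join by extending a running char list and tracks the dot test
-- with a flag, instead of re-joining and re-scanning every slice (same result, different algorithm).

-- ===== PORT A =====
def generate_name_combinations (names : List String) : List String :=
  names.foldl (fun combinations name =>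
    let parts := PySem.Str.split₀ name
    (PySem.List.pyRange 0 (PySem.List.len parts) 1).foldl (fun combs i =>
      (PySem.List.pyRange (i + 1) (PySem.List.len parts + 1) 1).foldl (fun combs j =>
        let combination := PySem.Str.join " " (PySem.List.slice parts (some i) (some j))
        if PySem.Str.isIn "." combination
            && !(PySem.Str.len (PySem.Str.replace combination "." "") == 0)
        then combs
        else combs ++ [combination]) combs) combinations) []

-- ===== PORT B =====
-- B's inner loop state: (combinations so far, running join as chars, has-dot flag).
def generate_name_combinations_alt (names : List String) : List String :=
  names.foldl (fun combinations name =>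
    let parts := PySem.Str.split₀ name
    (PySem.List.pyRange 0 (PySem.List.len parts) 1).foldl (fun combs start =>
      let acc0 := (PySem.List.pyGetD parts start "").toList
      let hasDot0 := '.' ∈ acc0
      let combs1 := if !(hasDot0 && acc0.any (· != '.')) then combs ++ [String.ofList acc0] else combs
      ((PySem.List.slice parts (some (start + 1)) none).foldl
        (fun (st : List String × List Char × Bool) part =>
          let acc := st.2.1 ++ ' ' :: part.toList
          let hasDot := st.2.2 || '.' ∈ part.toList
          (if !hasDot then st.1 ++ [String.ofList acc] else st.1, acc, hasDot))
        (combs1, acc0, hasDot0)).1) combinations) []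

-- ===== PRECONDITION & SPEC =====
def Spec_generate_name_combinations (names : List String) (out : List String) : Prop := out = generate_name_combinations_alt names
instance (names : List String) (out : List String) : Decidable (Spec_generate_name_combinations names out) := by unfold Spec_generate_name_combinations; infer_instance

-- ===== CLAIM (what is proved, stated in full; the proofs are below) =====
def Claim_equal_generate_name_combinations : Prop := ∀ (names : List String), Dom_generate_name_combinations names → Spec_generate_name_combinations names (generate_name_combinations names)

-- ===== LEMMAS AND PROOFS =====

theorem replace_go_dot (fuel : Nat) : ∀ (l acc : List Char), l.length ≤ fuel →
    PySem.Chars.replace.go ['.'] [] fuel l acc = acc.reverse ++ l.filter (· != '.') := by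
  induction fuel with
  | zero =>
    intro l acc h
    have hl : l = [] := List.eq_nil_of_length_eq_zero (by omega)
    subst hl; simp [PySem.Chars.replace.go]
  | succ n ih =>
    intro l acc h
    match l with
    | [] => simp [PySem.Chars.replace.go]
    | c :: t =>
      rw [PySem.Chars.replace.go]
      by_cases hc : c = '.'
      · subst hc
        simp only [List.isPrefixOf, BEq.rfl, Bool.true_and, if_pos, List.length_singleton,
          List.drop_succ_cons, List.drop_zero, List.reverse_nil, List.nil_append]
        rw [ih t acc (by simpa using Nat.le_of_succ_le_succ h)]
        simp
      · have hpre : List.isPrefixOf ['.'] (c :: t) = false := by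
          simp [List.isPrefixOf]; intro hh; exact absurd hh.symm hc
        rw [hpre]
        simp only [Bool.false_eq_true, if_false]
        rw [ih t (c :: acc) (by simpa using Nat.le_of_succ_le_succ h)]
        simp [hc]

theorem replace_dot (cs : List Char) : PySem.Chars.replace cs ['.'] [] = cs.filter (· != '.') := by
  rw [PySem.Chars.replace]
  simp [replace_go_dot cs.length cs [] le_rfl]

theorem isIn_dot (s : List Char) : PySem.Chars.isIn ['.'] s = true ↔ '.' ∈ s := by
  rw [PySem.Chars.isIn_iff_infix]
  constructor
  · intro h; exact h.mem (by simp)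
  · intro h
    obtain ⟨u, v, rfl⟩ := List.append_of_mem h
    exact ⟨u, v, by simp⟩

theorem mem_dot_join (ls : List (List Char)) :
    '.' ∈ PySem.Chars.join [' '] ls ↔ ∃ l ∈ ls, '.' ∈ l := by
  induction ls with
  | nil => simp [PySem.Chars.join_nil]
  | cons a t ih =>
    match t with
    | [] => simp [PySem.Chars.join_singleton]
    | b :: t' =>
      rw [PySem.Chars.join_cons_cons]
      simp only [List.mem_append, List.mem_cons, ih]
      constructor
      · rintro (h | h)
        · rcases h with h | h
          · exact ⟨a, Or.inl rfl, h⟩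
          · simp at h
        · rcases h with ⟨l, hl, hm⟩; exact ⟨l, Or.inr hl, hm⟩
      · rintro ⟨l, hl | hl, hm⟩
        · exact Or.inl (Or.inl (hl ▸ hm))
        · exact Or.inr ⟨l, hl, hm⟩

theorem join_append_singleton (ls : List (List Char)) (q : List Char) (h : ls ≠ []) :
    PySem.Chars.join [' '] (ls ++ [q]) = PySem.Chars.join [' '] ls ++ ' ' :: q := by
  induction ls with
  | nil => exact absurd rfl h
  | cons a t ih =>
    match t with
    | [] => rw [List.singleton_append, PySem.Chars.join_cons_cons, PySem.Chars.join_singleton,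
        PySem.Chars.join_singleton]; simp
    | b :: t' =>
      simp only [List.cons_append] at ih ⊢
      rw [PySem.Chars.join_cons_cons, ih (by simp), PySem.Chars.join_cons_cons]
      simp

theorem space_mem_join (a b : List Char) (t : List (List Char)) :
    ' ' ∈ PySem.Chars.join [' '] (a :: b :: t) := by
  rw [PySem.Chars.join_cons_cons]; simp

def stepA (combs : List String) (comb : String) : List String :=
  if PySem.Str.isIn "." comb && !(PySem.Str.len (PySem.Str.replace comb "." "") == 0)
  then combs else combs ++ [comb]

theorem len_replace_dot (s : String) :
    PySem.Str.len (PySem.Str.replace s "." "") = ((s.toList.filter (· != '.')).length : Int) := by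
  rw [PySem.Str.replace, PySem.Str.len]
  have : ("." : String).toList = ['.'] := rfl
  have h2 : ("" : String).toList = [] := rfl
  rw [this, h2, replace_dot]
  simp

theorem condA_eq (s : String) :
    (PySem.Str.isIn "." s && !(PySem.Str.len (PySem.Str.replace s "." "") == 0))
      = (decide ('.' ∈ s.toList) && s.toList.any (· != '.')) := by
  rw [len_replace_dot]
  have h1 : PySem.Str.isIn "." s = decide ('.' ∈ s.toList) := by
    rw [Bool.eq_iff_iff]
    rw [PySem.Str.isIn]
    have : ("." : String).toList = ['.'] := rfl
    rw [this, isIn_dot]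
    simp
  rw [h1]
  congr 1
  rw [Bool.eq_iff_iff]
  simp [List.any_eq_true]

def stepB (st : List String × List Char × Bool) (part : String) : List String × List Char × Bool :=
  let acc := st.2.1 ++ ' ' :: part.toList
  let hasDot := st.2.2 || decide ('.' ∈ part.toList)
  (if !hasDot then st.1 ++ [String.ofList acc] else st.1, acc, hasDot)

theorem innerLoop (rest : List String) : ∀ (out : List String) (pres : List (List Char)), pres ≠ [] →
    (List.range rest.length).foldl
      (fun combs m => stepA combs
        (String.ofList (PySem.Chars.join [' '] (pres ++ ((rest.take (m + 1)).map String.toList))))) out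
    = (rest.foldl stepB
        (out, PySem.Chars.join [' '] pres, decide (∃ l ∈ pres, '.' ∈ l))).1 := by
  induction rest with
  | nil => intro out pres h; simp
  | cons q rest' ih =>
    intro out pres h
    obtain ⟨a, pres', rfl⟩ : ∃ a t, pres = a :: t := by
      cases pres with
      | nil => exact absurd rfl h
      | cons a t => exact ⟨a, t, rfl⟩
    rw [List.length_cons, List.range_succ_eq_map, List.foldl_cons, List.foldl_map]
    -- first iteration (m = 0)
    have htake1 : (q :: rest').take 1 = [q] := rfl
    rw [htake1]
    have hcomb0 : PySem.Chars.join [' '] ((a :: pres') ++ [q].map String.toList)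
        = PySem.Chars.join [' '] (a :: pres') ++ ' ' :: q.toList := by
      simpa using join_append_singleton (a :: pres') q.toList (by simp)
    have hstep : stepA out (String.ofList (PySem.Chars.join [' '] ((a :: pres') ++ [q].map String.toList)))
        = (stepB (out, PySem.Chars.join [' '] (a :: pres'), decide (∃ l ∈ a :: pres', '.' ∈ l)) q).1 := by
      rw [stepA, stepB]
      have hsp : ' ' ∈ PySem.Chars.join [' '] ((a :: pres') ++ [q].map String.toList) := by
        rw [hcomb0]
        cases pres' with
        | nil => rw [PySem.Chars.join_singleton]; simp
        | cons b t => have := space_mem_join a b t; simp [this]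
      rw [condA_eq]
      have hany : (String.ofList (PySem.Chars.join [' '] ((a :: pres') ++ [q].map String.toList))).toList.any
          (· != '.') = true := by
        simp only [String.toList_ofList]
        exact List.any_eq_true.mpr ⟨' ', hsp, by decide⟩
      rw [hany, Bool.and_true]
      have hdot : decide ('.' ∈ (String.ofList (PySem.Chars.join [' '] ((a :: pres') ++ [q].map String.toList))).toList)
          = (decide (∃ l ∈ a :: pres', '.' ∈ l) || decide ('.' ∈ q.toList)) := by
        simp only [String.toList_ofList]
        rw [Bool.eq_iff_iff]
        simp only [decide_eq_true_eq, Bool.or_eq_true, mem_dot_join, List.mem_append,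
          List.mem_cons, List.map_cons, List.map_nil, List.not_mem_nil, or_false]
        aesop
      rw [hdot, hcomb0]
      cases hh : (decide (∃ l ∈ a :: pres', '.' ∈ l) || decide ('.' ∈ q.toList)) <;> simp
    rw [List.foldl_cons]
    have hdot2 : (decide (∃ l ∈ a :: pres', '.' ∈ l) || decide ('.' ∈ q.toList))
        = decide (∃ l ∈ (a :: pres') ++ [q.toList], '.' ∈ l) := by
      rw [Bool.eq_iff_iff]
      simp only [decide_eq_true_eq, Bool.or_eq_true, List.mem_append, List.mem_cons,
        List.not_mem_nil, or_false]
      aesop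
    have htrip : stepB (out, PySem.Chars.join [' '] (a :: pres'), decide (∃ l ∈ a :: pres', '.' ∈ l)) q
        = ((stepB (out, PySem.Chars.join [' '] (a :: pres'), decide (∃ l ∈ a :: pres', '.' ∈ l)) q).1,
           PySem.Chars.join [' '] ((a :: pres') ++ [q.toList]),
           decide (∃ l ∈ (a :: pres') ++ [q.toList], '.' ∈ l)) := by
      have hj : PySem.Chars.join [' '] ((a :: pres') ++ [q.toList])
          = PySem.Chars.join [' '] (a :: pres') ++ ' ' :: q.toList :=
        join_append_singleton (a :: pres') q.toList (by simp)
      rw [stepB, hj, ← hdot2]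
    rw [htrip, hstep]
    have hfun : (fun combs m => stepA combs
        (String.ofList (PySem.Chars.join [' ']
          ((a :: pres') ++ List.map String.toList (List.take (Nat.succ m + 1) (q :: rest'))))))
        = (fun combs m => stepA combs
        (String.ofList (PySem.Chars.join [' ']
          (((a :: pres') ++ [q.toList]) ++ List.map String.toList (List.take (m + 1) rest'))))) := by
      funext combs m
      congr 2
      rw [show Nat.succ m + 1 = (m + 1) + 1 from rfl, List.take_succ_cons]
      simp
    rw [hfun]
    exact ih _ ((a :: pres') ++ [q.toList]) (by simp)

theorem perStart (parts : List String) (k : Nat) (hk : k < parts.length) (combs : List String) :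
    (PySem.List.pyRange ((k : Int) + 1) (PySem.List.len parts + 1) 1).foldl
      (fun c j => stepA c (PySem.Str.join " " (PySem.List.slice parts (some (k : Int)) (some j)))) combs
    = (let acc0 := (PySem.List.pyGetD parts (k : Int) "").toList
       let hasDot0 := decide ('.' ∈ acc0)
       let combs1 := if !(hasDot0 && acc0.any (· != '.')) then combs ++ [String.ofList acc0] else combs
       ((PySem.List.slice parts (some ((k : Int) + 1)) none).foldl stepB (combs1, acc0, hasDot0)).1) := by
  have hlen : PySem.List.len parts = (parts.length : Int) := by simp
  have hget : PySem.List.pyGetD parts (k : Int) "" = parts[k] := by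
    rw [PySem.List.pyGetD_natCast]
    exact List.getD_eq_getElem _ _ hk
  have hdropk : parts.drop k = parts[k] :: parts.drop (k + 1) := List.drop_eq_getElem_cons hk
  have hrange : PySem.List.pyRange ((k : Int) + 1) (PySem.List.len parts + 1) 1
      = ((k : Int) + 1) :: PySem.List.pyRange ((k : Int) + 2) (PySem.List.len parts + 1) 1 := by
    rw [hlen, PySem.List.pyRange_one_cons (by omega)]
    have h2 : (k : Int) + 1 + 1 = (k : Int) + 2 := by ring
    rw [h2]
  rw [hrange]
  simp only [List.foldl_cons]
  -- the first combination is parts[k] itself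
  have hslice1 : PySem.List.slice parts (some (k : Int)) (some ((k : Int) + 1))
      = [parts[k]] := by
    have := PySem.List.slice_natCast_add parts k 1
    push_cast at this ⊢
    rw [this, hdropk]
    rfl
  have hjoin1 : PySem.Str.join " " [parts[k]] = parts[k] := by
    rw [PySem.Str.join]
    simp [PySem.Chars.join_singleton]
  have hstep1 : stepA combs (PySem.Str.join " " (PySem.List.slice parts (some (k : Int)) (some ((k : Int) + 1))))
      = (if !(decide ('.' ∈ (PySem.List.pyGetD parts (k : Int) "").toList)
              && (PySem.List.pyGetD parts (k : Int) "").toList.any (· != '.'))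
         then combs ++ [String.ofList (PySem.List.pyGetD parts (k : Int) "").toList] else combs) := by
    rw [hslice1, hjoin1, stepA, condA_eq, hget]
    cases hh : (decide ('.' ∈ (parts[k]).toList) && (parts[k]).toList.any (· != '.')) <;> simp
  rw [hstep1]
  -- the remaining range is rest
  have hdroplen : (parts.drop (k + 1)).length = parts.length - (k + 1) := List.length_drop
  have hrest : PySem.List.slice parts (some ((k : Int) + 1)) none = parts.drop (k + 1) := by
    have := PySem.List.slice_from_natCast parts (k + 1)
    push_cast at this
    exact this
  rw [hrest]
  have hrange2 : PySem.List.pyRange ((k : Int) + 2) (PySem.List.len parts + 1) 1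
      = (List.range (parts.drop (k + 1)).length).map (fun m : Nat => (k : Int) + 2 + (m : Int)) := by
    rw [hlen, PySem.List.pyRange_one]
    have h3 : (((parts.length : Int) + 1) - ((k : Int) + 2)).toNat = (parts.drop (k + 1)).length := by
      rw [hdroplen]; omega
    rw [h3]
  rw [hrange2, List.foldl_map]
  have hfun : ∀ (c : List String) (m : Nat), m < (parts.drop (k + 1)).length →
      stepA c (PySem.Str.join " " (PySem.List.slice parts (some (k : Int)) (some ((k : Int) + 2 + (m : Int)))))
      = stepA c (String.ofList (PySem.Chars.join [' ']
          ([(parts[k]).toList] ++ List.map String.toList (List.take (m + 1) (parts.drop (k + 1)))))) := by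
    intro c m hm
    congr 1
    have he : (k : Int) + 2 + (m : Int) = (k : Int) + ((m + 2 : Nat) : Int) := by push_cast; ring
    rw [he, PySem.List.slice_natCast_add parts k (m + 2), hdropk, List.take_succ_cons,
      PySem.Str.join]
    simp
  rw [PySem.List.foldl_congr_mem _ _ _ _ (fun c m hm => hfun c m (List.mem_range.mp hm))]
  rw [innerLoop _ _ [(parts[k]).toList] (by simp)]
  simp [hget, PySem.Chars.join_singleton]

theorem ports_eq (names : List String) :
    generate_name_combinations names = generate_name_combinations_alt names := by
  rw [generate_name_combinations, generate_name_combinations_alt]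
  apply PySem.List.foldl_congr_mem
  intro combinations name _
  apply PySem.List.foldl_congr_mem
  intro combs i hi
  have hi' := (PySem.List.mem_pyRange_one).mp hi
  have hlen : PySem.List.len (PySem.Str.split₀ name) = ((PySem.Str.split₀ name).length : Int) := by
    simp
  have hk : i.toNat < (PySem.Str.split₀ name).length := by
    rw [hlen] at hi'; omega
  have hik : i = ((i.toNat : Nat) : Int) := by omega
  rw [hik]
  exact perStart (PySem.Str.split₀ name) i.toNat hk combs


-- ===== VERDICT (by name: the statement is the Claim_ definition above) =====
theorem generate_name_combinations_spec : Claim_equal_generate_name_combinations := by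
  intro names _
  unfold Spec_generate_name_combinations
  exact ports_eq names
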